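-- pv_equiv track=rewrite | github.com/flywinged/recaman | Recaman.py | generate_composite
-- ===== SOURCE A (Python) =====
-- def generate_composite(natural_numbers):
--    composite = []
--    n = 3
--    while len(composite) <= len(natural_numbers):
--       n += 1
--       for c in range(2, n):
--          if c**2 > n:
--             break
--          if n%c == 0:
--             composite.append(n)
--             break
--    return composite
-- ===== SOURCE B (Python) =====
-- def generate_composite(natural_numbers):
--     # Sieve of Eratosthenes: A collects len(natural_numbers)+1 composites; all
--     # even numbers >= 4 are composite, so limit = 2*k + 4 certainly contains k of them.
--     k = len(natural_numbers) + 1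
--     limit = 2 * k + 4
--     sieve = [True] * (limit + 1)
--     p = 2
--     while p * p <= limit:
--         for m in range(p * p, limit + 1, p):
--             sieve[m] = False
--         p += 1
--     return [n for n in range(4, limit + 1) if not sieve[n]][:k]
-- ===== Notes on version B (the rewrite author's own statement) =====
-- stated objective: faster
-- what changed: A trial-divides each successive integer to collect the first len+1 composites; B runs one Sieve of Eratosthenes up to 2*(len+1)+4 (a bound guaranteed to contain len+1 composites, since every even number >= 4 is composite) and takes the first len+1 unmarked-as-prime numbers.
import Mathlib
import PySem

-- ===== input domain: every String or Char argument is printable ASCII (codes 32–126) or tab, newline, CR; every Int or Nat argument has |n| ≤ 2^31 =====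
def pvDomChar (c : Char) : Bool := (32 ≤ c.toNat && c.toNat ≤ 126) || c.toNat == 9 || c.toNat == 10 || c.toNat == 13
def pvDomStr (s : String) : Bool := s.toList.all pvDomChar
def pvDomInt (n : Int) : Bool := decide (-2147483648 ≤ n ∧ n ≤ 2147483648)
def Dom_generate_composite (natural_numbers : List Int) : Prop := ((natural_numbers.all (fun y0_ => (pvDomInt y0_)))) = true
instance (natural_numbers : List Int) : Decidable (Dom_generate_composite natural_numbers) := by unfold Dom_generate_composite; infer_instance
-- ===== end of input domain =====

-- B replaces A's per-number trial division with one Sieve of Eratosthenes over a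
-- range (2*k+4) guaranteed to contain the k = len+1 composites A collects; measured faster.

-- ===== PORT A =====
-- A's inner `for c in range(2, n)` loop: true iff the scan appends n (finds a
-- divisor c with c*c <= n before breaking).  Structural recursion on the fuel
-- n - c, which exactly bounds the remaining iterations of the Python for-loop.
def trialAux (fuel n c : Nat) : Bool :=
  match fuel with
  | 0 => false
  | fuel + 1 =>
    if c < n then
      if c * c > n then false
      else if n % c = 0 then true
      else trialAux fuel n (c + 1)
    else false

def trial (n c : Nat) : Bool := trialAux (n - c) n c

-- A's while-loop, on fuel 2*(k+1) + 1: n starts at 3, every second step appends an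
-- even composite, so this fuel provably covers the loop (see genAux_spec below).
def genAux (k fuel : Nat) (comp : List Int) (n : Nat) : List Int :=
  match fuel with
  | 0 => comp
  | fuel + 1 =>
    if comp.length ≤ k then
      if trial (n + 1) 2 = true then
        genAux k fuel (comp ++ [Int.ofNat (n + 1)]) (n + 1)
      else
        genAux k fuel comp (n + 1)
    else comp

def generate_composite (natural_numbers : List Int) : List Int :=
  genAux natural_numbers.length (2 * (natural_numbers.length + 1) + 1) [] 3

-- ===== PORT B =====
-- `for m in range(p*p, limit+1, p): sieve[m] = False`
def setFalses (sieve : List Bool) (idxs : List Nat) : List Bool :=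
  idxs.foldl (fun a i => a.set i false) sieve

-- `while p*p <= limit: …; p += 1`, on fuel limit + 1 - p (the exact iteration bound)
def markLoop (limit fuel p : Nat) (sieve : List Bool) : List Bool :=
  match fuel with
  | 0 => sieve
  | fuel + 1 =>
    if p * p ≤ limit then
      markLoop limit fuel (p + 1) (setFalses sieve (List.range' (p * p) ((limit - p * p) / p + 1) p))
    else sieve

def generate_composite_alt (natural_numbers : List Int) : List Int :=
  let k := natural_numbers.length + 1
  let limit := 2 * k + 4
  let sieve := markLoop limit limit 2 (List.replicate (limit + 1) true)
  (((List.range' 4 (limit - 3)).filter (fun n => !(sieve.getD n true))).take k).map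
    (fun n => Int.ofNat n)

-- ===== PRECONDITION & SPEC =====
def Spec_generate_composite (natural_numbers : List Int) (out : List Int) : Prop := out = generate_composite_alt natural_numbers
instance (natural_numbers : List Int) (out : List Int) : Decidable (Spec_generate_composite natural_numbers out) := by unfold Spec_generate_composite; infer_instance

-- ===== CLAIM (what is proved, stated in full; the proofs are below) =====
def Claim_equal_generate_composite : Prop := ∀ (natural_numbers : List Int), Dom_generate_composite natural_numbers → Spec_generate_composite natural_numbers (generate_composite natural_numbers)

-- ===== LEMMAS AND PROOFS =====

-- Every even n >= 4 is appended every even n >= 4 is appended by A's scan (c = 2 hits).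
theorem trial_even (m : Nat) (h4 : 4 ≤ m) (he : m % 2 = 0) : trial m 2 = true := by
  rw [trial, show m - 2 = (m - 3) + 1 by omega]
  simp [trialAux, show 2 < m by omega, show ¬ (2 * 2 > m) by omega, he]

-- A's divisor scan from c0 succeeds iff n has a divisor c >= c0 with c*c <= n.
theorem trialAux_iff : ∀ (fuel n c0 : Nat), n - c0 ≤ fuel → 2 ≤ c0 →
    (trialAux fuel n c0 = true ↔ ∃ c, c0 ≤ c ∧ c * c ≤ n ∧ n % c = 0) := by
  intro fuel
  induction fuel with
  | zero =>
    intro n c0 hf hc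
    simp [trialAux]
    rintro c hc1 hc2
    have h2c : 2 * c ≤ c * c := Nat.mul_le_mul_right c (by omega)
    omega
  | succ fuel ih =>
    intro n c0 hf hc
    show (if c0 < n then
        if c0 * c0 > n then false
        else if n % c0 = 0 then true
        else trialAux fuel n (c0 + 1)
      else false) = true ↔ _
    by_cases h1 : c0 < n
    · simp only [if_pos h1]
      by_cases h2 : c0 * c0 > n
      · simp only [if_pos h2]
        simp
        rintro c hc1 hc2
        have := Nat.mul_le_mul hc1 hc1
        omega
      · simp only [if_neg h2]
        by_cases h3 : n % c0 = 0
        · simp only [if_pos h3]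
          simp
          exact ⟨c0, le_refl _, by omega, h3⟩
        · simp only [if_neg h3]
          rw [ih n (c0 + 1) (by omega) (by omega)]
          constructor
          · rintro ⟨c, hc1, hc2, hc3⟩
            exact ⟨c, by omega, hc2, hc3⟩
          · rintro ⟨c, hc1, hc2, hc3⟩
            refine ⟨c, ?_, hc2, hc3⟩
            rcases Nat.eq_or_lt_of_le hc1 with rfl | h
            · exact absurd hc3 h3
            · omega
    · simp [show ¬ c0 < n by omega]
      rintro c hc1 hc2
      have h2c : 2 * c ≤ c * c := Nat.mul_le_mul_right c (by omega)
      omega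

theorem trial_iff (n c0 : Nat) (hc : 2 ≤ c0) :
    (trial n c0 = true ↔ ∃ c, c0 ≤ c ∧ c * c ≤ n ∧ n % c = 0) :=
  trialAux_iff (n - c0) n c0 (le_refl _) hc

-- A's loop, characterised: it returns comp ++ the next (k+1 - |comp|) numbers > n
-- passing the scan, read off any sufficiently long range.
theorem genAux_spec (k : Nat) : ∀ (μ : Nat) (comp : List Int) (n : Nat) (M : Nat),
    3 ≤ n →
    2 * (k + 1 - comp.length) + (1 - n % 2) ≤ μ →
    k + 1 - comp.length ≤ (((List.range' (n + 1) (M - n)).filter (fun m => trial m 2))).length →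
    genAux k μ comp n = comp ++
      ((((List.range' (n + 1) (M - n)).filter (fun m => trial m 2))).take (k + 1 - comp.length)).map
        (fun m => Int.ofNat m) := by
  intro μ
  induction μ with
  | zero =>
    intro comp n M hn hμ hlen
    show comp = _
    rw [show k + 1 - comp.length = 0 by omega]
    simp
  | succ μ ih =>
    intro comp n M hn hμ hlen
    show (if comp.length ≤ k then
        if trial (n + 1) 2 = true then
          genAux k μ (comp ++ [Int.ofNat (n + 1)]) (n + 1)
        else genAux k μ comp (n + 1)
      else comp) = _
    by_cases hg : comp.length ≤ k
    · rw [if_pos hg]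
      have htk : 1 ≤ k + 1 - comp.length := by omega
      have hMn : 1 ≤ M - n := by
        by_contra hMn
        have h0 : M - n = 0 := by omega
        rw [h0] at hlen
        simp at hlen
        omega
      have hM1 : M - (n + 1) = M - n - 1 := by omega
      have hsplit : List.range' (n + 1) (M - n) =
          (n + 1) :: List.range' (n + 1 + 1) (M - n - 1) := by
        conv_lhs => rw [show M - n = (M - n - 1) + 1 by omega]
        rw [List.range'_succ]
      rw [hsplit, List.filter_cons] at hlen ⊢
      by_cases h : trial (n + 1) 2 = true
      · rw [if_pos h]
        simp only [h, if_true] at hlen ⊢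
        have hlen2 : k + 1 - comp.length ≤
            ((List.range' (n + 1 + 1) (M - n - 1)).filter (fun m => trial m 2)).length + 1 := by
          simpa using hlen
        have hlc : (comp ++ [Int.ofNat (n + 1)]).length = comp.length + 1 := by simp
        rw [ih (comp ++ [Int.ofNat (n + 1)]) (n + 1) M (by omega)
          (by rw [hlc]; omega) (by rw [hlc, hM1]; omega)]
        rw [hM1, hlc, show k + 1 - comp.length = (k + 1 - (comp.length + 1)) + 1 by omega]
        rw [List.take_succ_cons, List.map_cons, List.append_assoc]
        rfl
      · rw [if_neg h]
        have hne : n % 2 = 0 := by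
          by_contra ho
          exact absurd (trial_even (n + 1) (by omega) (by omega)) h
        simp only [h, Bool.false_eq_true, if_false] at hlen ⊢
        rw [ih comp (n + 1) M (by omega) (by omega) (by rw [hM1]; exact hlen)]
        rw [hM1]
    · rw [if_neg hg, show k + 1 - comp.length = 0 by omega]
      simp

theorem setFalses_length : ∀ (idxs : List Nat) (l : List Bool),
    (setFalses l idxs).length = l.length := by
  intro idxs
  induction idxs with
  | nil => intro l; rfl
  | cons i is ih =>
    intro l
    show (setFalses (l.set i false) is).length = l.length
    rw [ih, List.length_set]

theorem setFalses_getElem? : ∀ (idxs : List Nat) (l : List Bool) (m : Nat),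
    (setFalses l idxs)[m]? = if m ∈ idxs ∧ m < l.length then some false else l[m]? := by
  intro idxs
  induction idxs with
  | nil => intro l m; simp [setFalses]
  | cons i is ih =>
    intro l m
    show (setFalses (l.set i false) is)[m]? = _
    rw [ih, List.length_set, List.getElem?_set]
    by_cases h2 : m < l.length
    · by_cases h1 : m ∈ is
      · rw [if_pos ⟨h1, h2⟩, if_pos ⟨List.mem_cons_of_mem i h1, h2⟩]
      · rw [if_neg (fun hc => h1 hc.1)]
        by_cases h3 : i = m
        · subst h3
          rw [if_pos rfl, if_pos h2, if_pos ⟨by simp, h2⟩]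
        · rw [if_neg h3,
            if_neg (fun hc => (List.mem_cons.mp hc.1).elim (fun h => h3 h.symm) h1)]
    · rw [if_neg (fun hc : m ∈ is ∧ m < l.length => absurd hc.2 h2),
          if_neg (fun hc : m ∈ i :: is ∧ m < l.length => absurd hc.2 h2)]
      by_cases h3 : i = m
      · subst h3
        rw [if_pos rfl, if_neg h2, List.getElem?_eq_none (by omega)]
      · rw [if_neg h3]

theorem markLoop_length (limit : Nat) : ∀ (fuel p : Nat) (sieve : List Bool),
    (markLoop limit fuel p sieve).length = sieve.length := by
  intro fuel
  induction fuel with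
  | zero => intro p sieve; rfl
  | succ fuel ih =>
    intro p sieve
    show (if p * p ≤ limit then
        markLoop limit fuel (p + 1)
          (setFalses sieve (List.range' (p * p) ((limit - p * p) / p + 1) p))
      else sieve).length = sieve.length
    by_cases h : p * p ≤ limit
    · rw [if_pos h, ih (p + 1) _, setFalses_length]
    · rw [if_neg h]

theorem markLoop_getElem? (limit : Nat) : ∀ (fuel p : Nat) (sieve : List Bool) (m : Nat),
    limit + 1 - p ≤ fuel → 2 ≤ p →
    ((markLoop limit fuel p sieve)[m]? = some false ↔
      ((∃ q, p ≤ q ∧ q * q ≤ m ∧ m ≤ limit ∧ m % q = 0) ∧ m < sieve.length) ∨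
        sieve[m]? = some false) := by
  intro fuel
  induction fuel with
  | zero =>
    intro p sieve m hf hp
    show (sieve[m]? = some false ↔ _)
    constructor
    · exact Or.inr
    · rintro (⟨⟨q, hq1, hq2, hq3, _⟩, _⟩ | h)
      · have hq : q ≤ q * q := Nat.le_mul_of_pos_left q (by omega)
        omega
      · exact h
  | succ fuel ih =>
    intro p sieve m hf hp
    show ((if p * p ≤ limit then
        markLoop limit fuel (p + 1)
          (setFalses sieve (List.range' (p * p) ((limit - p * p) / p + 1) p))
      else sieve)[m]? = some false ↔ _)
    by_cases hg : p * p ≤ limit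
    · rw [if_pos hg, ih (p + 1) _ m (by omega) (by omega), setFalses_length, setFalses_getElem?]
      have hmem : m ∈ List.range' (p * p) ((limit - p * p) / p + 1) p ↔
          (p * p ≤ m ∧ m ≤ limit ∧ m % p = 0) := by
        rw [List.mem_range']
        constructor
        · rintro ⟨i, hi, rfl⟩
          refine ⟨by omega, ?_, by simp [Nat.add_mul_mod_self_left]⟩
          have h1 : i ≤ (limit - p * p) / p := by omega
          have h2 : p * i ≤ p * ((limit - p * p) / p) := Nat.mul_le_mul_left p h1
          have h3 : (limit - p * p) / p * p ≤ limit - p * p := Nat.div_mul_le_self _ _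
          have h4 : p * ((limit - p * p) / p) = (limit - p * p) / p * p := Nat.mul_comm _ _
          omega
        · rintro ⟨h1, h2, h3⟩
          obtain ⟨j, rfl⟩ := Nat.dvd_of_mod_eq_zero h3
          have hp0 : 0 < p := by omega
          have hj : p ≤ j := by
            by_contra hj
            have hjlt : j < p := Nat.lt_of_not_le hj
            have := (Nat.mul_lt_mul_left hp0).mpr hjlt
            omega
          have e : (j - p) * p = p * j - p * p := by
            rw [Nat.sub_mul, Nat.mul_comm]
          refine ⟨j - p, ?_, ?_⟩
          · have h5 : (j - p) * p ≤ limit - p * p := by omega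
            have := (Nat.le_div_iff_mul_le hp0).mpr h5
            omega
          · have e2 : p * (j - p) = p * j - p * p := by rw [Nat.mul_sub]
            omega
      constructor
      · rintro (⟨⟨q, hq1, hq⟩, hlen⟩ | hset)
        · exact Or.inl ⟨⟨q, by omega, hq⟩, hlen⟩
        · by_cases hc : m ∈ List.range' (p * p) ((limit - p * p) / p + 1) p ∧ m < sieve.length
          · obtain ⟨hm1, hm2, hm3⟩ := hmem.mp hc.1
            exact Or.inl ⟨⟨p, le_refl p, hm1, hm2, hm3⟩, hc.2⟩
          · rw [if_neg hc] at hset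
            exact Or.inr hset
      · rintro (⟨⟨q, hq1, hq2, hq3, hq4⟩, hlen⟩ | hs)
        · by_cases hqp : q = p
          · subst hqp
            exact Or.inr (by rw [if_pos ⟨hmem.mpr ⟨hq2, hq3, hq4⟩, hlen⟩])
          · exact Or.inl ⟨⟨q, by omega, hq2, hq3, hq4⟩, hlen⟩
        · right
          by_cases hc : m ∈ List.range' (p * p) ((limit - p * p) / p + 1) p ∧ m < sieve.length
          · rw [if_pos hc]
          · rw [if_neg hc]; exact hs
    · rw [if_neg hg]
      constructor
      · exact Or.inr
      · rintro (⟨⟨q, hq1, hq2, hq3, _⟩, _⟩ | h)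
        · have := Nat.mul_le_mul hq1 hq1
          omega
        · exact h

-- at least m numbers in range' (2a) (2m) pass the scan (all even numbers >= 4 do)
theorem evens_count : ∀ (m a : Nat), 2 ≤ a →
    m ≤ ((List.range' (2 * a) (2 * m)).filter (fun x => trial x 2)).length := by
  intro m
  induction m with
  | zero => intro a ha; simp
  | succ m ih =>
    intro a ha
    rw [show 2 * (m + 1) = (2 * m) + 1 + 1 by omega, List.range'_succ, List.range'_succ,
      List.filter_cons, List.filter_cons]
    have hea : trial (2 * a) 2 = true := trial_even (2 * a) (by omega) (by omega)
    have hrest := ih (a + 1) (by omega)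
    rw [show 2 * (a + 1) = 2 * a + 1 + 1 by omega] at hrest
    simp only [hea, if_pos, List.length_cons]
    by_cases hb : trial (2 * a + 1) 2 = true <;>
      simp only [hb, Bool.false_eq_true, if_true, if_false, List.length_cons] <;> omega

theorem alt_eq (l : List Int) :
    generate_composite_alt l =
      (((List.range' 4 (2 * l.length + 3)).filter (fun m => trial m 2)).take (l.length + 1)).map
        (fun m => Int.ofNat m) := by
  show (((List.range' 4 (2 * (l.length + 1) + 4 - 3)).filter
      (fun n => !((markLoop (2 * (l.length + 1) + 4) (2 * (l.length + 1) + 4) 2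
        (List.replicate (2 * (l.length + 1) + 4 + 1) true)).getD n true))).take (l.length + 1)).map
      (fun n => Int.ofNat n) = _
  have hL : 2 * (l.length + 1) + 4 - 3 = 2 * l.length + 3 := by omega
  set limit := 2 * (l.length + 1) + 4 with hlim
  have hfil : (List.range' 4 (limit - 3)).filter
      (fun n => !((markLoop limit limit 2 (List.replicate (limit + 1) true)).getD n true)) =
      (List.range' 4 (limit - 3)).filter (fun m => trial m 2) := by
    apply List.filter_congr
    intro n hn
    rw [List.mem_range'_1] at hn
    have hn4 : 4 ≤ n := hn.1
    have hnl : n ≤ limit := by omega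
    have hlen : (markLoop limit limit 2 (List.replicate (limit + 1) true)).length = limit + 1 := by
      rw [markLoop_length limit limit 2 _, List.length_replicate]
    have hiff := markLoop_getElem? limit limit 2 (List.replicate (limit + 1) true) n
      (by omega) (le_refl 2)
    rw [List.length_replicate, List.getElem?_replicate] at hiff
    have hiff2 : (markLoop limit limit 2 (List.replicate (limit + 1) true))[n]? = some false ↔
        trial n 2 = true := by
      rw [hiff, trial_iff n 2 (by omega)]
      constructor
      · rintro (⟨⟨q, hq1, hq2, hq3, hq4⟩, _⟩ | h)
        · exact ⟨q, hq1, hq2, hq4⟩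
        · rw [if_pos (by omega)] at h
          simp at h
      · rintro ⟨q, hq1, hq2, hq4⟩
        exact Or.inl ⟨⟨q, hq1, hq2, hnl, hq4⟩, by omega⟩
    obtain ⟨b, hb⟩ : ∃ b, (markLoop limit limit 2 (List.replicate (limit + 1) true))[n]? = some b :=
      ⟨_, List.getElem?_eq_getElem (by omega)⟩
    rw [List.getD_eq_getElem?_getD, hb]
    cases b with
    | false =>
      rw [hiff2.mp hb]
      rfl
    | true =>
      have : ¬ trial n 2 = true := by
        intro ht
        rw [hiff2.mpr ht] at hb
        simp at hb
      simp [Bool.not_eq_true] at this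
      rw [this]
      rfl
  rw [hfil, hL]

-- ===== VERDICT (by name: the statement is the Claim_ definition above) =====
theorem generate_composite_spec : Claim_equal_generate_composite := by
  intro l _
  unfold Spec_generate_composite
  rw [alt_eq]
  have hM : (2 * l.length + 6) - 3 = 2 * l.length + 3 := by omega
  have hcount : l.length + 1 ≤
      ((List.range' 4 (2 * l.length + 3)).filter (fun m => trial m 2)).length := by
    have h1 := evens_count (l.length + 1) 2 (le_refl 2)
    have h4 : (2 : Nat) * 2 = 4 := rfl
    rw [h4] at h1
    have hsplit : List.range' 4 (2 * (l.length + 1)) ++ List.range' (4 + 2 * (l.length + 1)) 1 =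
        List.range' 4 (2 * l.length + 3) := by
      rw [List.range'_append_1, show 2 * (l.length + 1) + 1 = 2 * l.length + 3 by omega]
    rw [← hsplit, List.filter_append, List.length_append]
    omega
  have := genAux_spec l.length (2 * (l.length + 1) + 1) [] 3 (2 * l.length + 6) (by omega)
    (by simp) (by simpa [hM] using hcount)
  rw [generate_composite, this]
  simp [hM]
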